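-- pv_equiv track=rewrite | github.com/sanjeevbcep/codevita | sanjeev_orchard.py | count
-- ===== SOURCE A (Python) =====
-- def count(row):
--     count = 0
--     last = -1
--     for i in range(len(row) - 1):
--         if row[i] != row[i + 1]:
--             count += (i - last) * (len(row) - i - 1)
--             last = i
--     return count
-- ===== SOURCE B (Python) =====
-- def count(row):
--     # Count non-constant contiguous subarrays: all subarrays minus the
--     # all-equal ones, found by scanning maximal runs of equal values.
--     if not row:
--         return 0
--     n = len(row)
--     total = n * (n + 1) // 2
--     const = 0
--     run = 1
--     for prev, x in zip(row, row[1:]):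
--         if x == prev:
--             run += 1
--         else:
--             const += run * (run + 1) // 2
--             run = 1
--     const += run * (run + 1) // 2
--     return total - const
-- ===== Notes on version B (the rewrite author's own statement) =====
-- stated objective: simpler
-- what changed: A sums (i-last)*(n-i-1) over change boundaries using an index loop with repeated row[i] indexing; B counts all subarrays with the closed form n*(n+1)//2 and subtracts each maximal equal-run's constant subarrays in one zip scan over adjacent pairs.
import Mathlib
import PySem

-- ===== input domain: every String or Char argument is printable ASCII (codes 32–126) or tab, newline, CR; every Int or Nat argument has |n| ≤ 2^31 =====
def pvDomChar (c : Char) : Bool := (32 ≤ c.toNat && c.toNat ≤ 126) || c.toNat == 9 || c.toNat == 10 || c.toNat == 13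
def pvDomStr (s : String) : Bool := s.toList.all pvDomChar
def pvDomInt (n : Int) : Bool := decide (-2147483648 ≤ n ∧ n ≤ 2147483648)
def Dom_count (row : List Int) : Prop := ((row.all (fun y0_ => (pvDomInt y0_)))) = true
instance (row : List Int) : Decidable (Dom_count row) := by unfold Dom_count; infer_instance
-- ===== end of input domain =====

-- B replaces A's last-change-index boundary sum by the closed form n*(n+1)//2 minus
-- the constant subarrays of each maximal run (simpler decomposition, same O(n) cost).


-- ===== PORT A =====
def count (row : List Int) : Int :=
  ((PySem.List.pyRange 0 ((row.length : Int) - 1) 1).foldl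
    (fun (s : Int × Int) i =>
      if PySem.List.pyGetD row i 0 ≠ PySem.List.pyGetD row (i + 1) 0 then
        (s.1 + (i - s.2) * ((row.length : Int) - i - 1), i)
      else s)
    (0, -1)).1

-- ===== PORT B =====
def count_alt (row : List Int) : Int :=
  match row with
  | [] => 0
  | _ =>
    let n : Int := row.length
    let total := PySem.Int.floordiv (n * (n + 1)) 2
    let s := (row.zip row.tail).foldl
      (fun (s : Int × Int) p =>
        if p.2 = p.1 then (s.1, s.2 + 1)
        else (s.1 + PySem.Int.floordiv (s.2 * (s.2 + 1)) 2, 1))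
      (0, 1)
    total - (s.1 + PySem.Int.floordiv (s.2 * (s.2 + 1)) 2)

-- ===== PRECONDITION & SPEC =====
def Spec_count (row : List Int) (out : Int) : Prop := out = count_alt row
instance (row : List Int) (out : Int) : Decidable (Spec_count row out) := by unfold Spec_count; infer_instance

-- ===== CLAIM (what is proved, stated in full; the proofs are below) =====
def Claim_equal_count : Prop := ∀ (row : List Int), Dom_count row → Spec_count row (count row)

-- ===== LEMMAS AND PROOFS =====

-- Proof-side recursion mirroring A's loop on the suffix of the list.
def aRec (n last c i : Int) : List Int → Int
  | [] => c
  | [_] => c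
  | x :: y :: r =>
    if x ≠ y then aRec n i (c + (i - last) * (n - i - 1)) (i + 1) (y :: r)
    else aRec n last c (i + 1) (y :: r)

-- Division-free constant-subarray sum over runs (2 × B's const accumulator).
def go2 (prev run : Int) : List Int → Int
  | [] => run * (run + 1)
  | y :: r => if y = prev then go2 y (run + 1) r else run * (run + 1) + go2 y 1 r

theorem two_mul_floordiv_even (r : Int) :
    2 * PySem.Int.floordiv (r * (r + 1)) 2 = r * (r + 1) := by
  obtain ⟨k, hk⟩ := Int.even_mul_succ_self r
  have h : PySem.Int.floordiv (r * (r + 1)) 2 = k := by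
    rw [PySem.Int.floordiv_eq_iff_of_pos (by omega)]; omega
  omega

-- A's foldl over range(k, n-1) equals aRec on the suffix row.drop k.
theorem count_eq_aRec (row : List Int) :
    ∀ (ys : List Int) (k : Nat) (c last : Int), row.drop k = ys →
    ((PySem.List.pyRange (k : Int) ((row.length : Int) - 1) 1).foldl
      (fun (s : Int × Int) i =>
        if PySem.List.pyGetD row i 0 ≠ PySem.List.pyGetD row (i + 1) 0 then
          (s.1 + (i - s.2) * ((row.length : Int) - i - 1), i)
        else s)
      (c, last)).1 = aRec (row.length : Int) last c (k : Int) ys := by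
  intro ys
  induction ys with
  | nil =>
    intro k c last hdrop
    have hlen : row.length ≤ k := by
      have := congrArg List.length hdrop
      simp [List.length_drop] at this; omega
    rw [PySem.List.pyRange_one_eq_nil (by omega)]
    simp [aRec]
  | cons x ys ih =>
    intro k c last hdrop
    match ys, ih with
    | [], _ =>
      have hlen : row.length = k + 1 := by
        have := congrArg List.length hdrop
        simp [List.length_drop] at this; omega
      rw [PySem.List.pyRange_one_eq_nil (by omega)]
      simp [aRec]
    | y :: r, ih =>
      have hlen : row.length = k + 2 + r.length := by
        have := congrArg List.length hdrop
        simp [List.length_drop] at this; omega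
      have hx : row.getD k 0 = x := by
        have h0 : row[k + 0]? = some x := by rw [← List.getElem?_drop, hdrop]; rfl
        simp only [Nat.add_zero] at h0
        simp [List.getD_eq_getElem?_getD, h0]
      have hy : row.getD (k + 1) 0 = y := by
        have h1 : row[k + 1]? = some y := by rw [← List.getElem?_drop, hdrop]; rfl
        simp [List.getD_eq_getElem?_getD, h1]
      have hdrop' : row.drop (k + 1) = y :: r := by
        have : row.drop (k + 1) = (row.drop k).tail := by
          rw [← List.drop_drop]; simp
        rw [this, hdrop]; rfl
      rw [PySem.List.pyRange_one_cons (by omega)]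
      simp only [List.foldl_cons]
      have hk1 : ((k : Int) + 1) = ((k + 1 : Nat) : Int) := by push_cast; omega
      rw [show PySem.List.pyGetD row (k : Int) 0 = x by
            rw [PySem.List.pyGetD_natCast]; exact hx,
          show PySem.List.pyGetD row ((k : Int) + 1) 0 = y by
            rw [hk1, PySem.List.pyGetD_natCast]; exact hy]
      by_cases hxy : x = y
      · simp only [hxy, ne_eq, not_true_eq_false, if_false]
        rw [hk1, ih (k + 1) c last hdrop']
        simp [aRec]
      · simp only [ne_eq, hxy, not_false_eq_true, if_true]
        rw [hk1, ih (k + 1) (c + ((k : Int) - last) * ((row.length : Int) - (k : Int) - 1)) (k : Int) hdrop']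
        simp [aRec, hxy]

-- Core identity: aRec on x::ys in terms of the run sum go2.
theorem aRec_go2 :
    ∀ (ys : List Int) (x i last c : Int),
    2 * aRec (i + 1 + (ys.length : Int)) last c i (x :: ys) =
      2 * c + 2 * (i - last) * (ys.length : Int)
        + (ys.length : Int) * ((ys.length : Int) + 1)
        + (i - last) * ((i - last) + 1) - go2 x (i - last) ys := by
  intro ys
  induction ys with
  | nil => intro x i last c; simp [aRec, go2]
  | cons y r ih =>
    intro x i last c
    by_cases hxy : x = y
    · have h1 : aRec (i + 1 + ((y :: r).length : Int)) last c i (x :: y :: r)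
          = aRec (i + 1 + ((y :: r).length : Int)) last c (i + 1) (y :: r) := by
        simp [aRec, hxy]
      have hn : i + 1 + ((y :: r).length : Int) = (i + 1) + 1 + (r.length : Int) := by
        push_cast [List.length_cons]; omega
      rw [h1, hn, ih y (i + 1) last c]
      simp [go2, hxy]
      ring_nf
    · have h1 : aRec (i + 1 + ((y :: r).length : Int)) last c i (x :: y :: r)
          = aRec (i + 1 + ((y :: r).length : Int)) i
              (c + (i - last) * ((i + 1 + ((y :: r).length : Int)) - i - 1)) (i + 1) (y :: r) := by
        simp [aRec, hxy]
      have hn : i + 1 + ((y :: r).length : Int) = (i + 1) + 1 + (r.length : Int) := by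
        push_cast [List.length_cons]; omega
      rw [h1, hn, ih y (i + 1) i _]
      have hne : ¬ (y = x) := fun h => hxy h.symm
      simp [go2, hne]
      ring_nf

-- B's fold over the zipped pairs in terms of go2.
theorem bFold_go2 :
    ∀ (ys : List Int) (x c r : Int),
    2 * (let s := ((x :: ys).zip ys).foldl
          (fun (s : Int × Int) p =>
            if p.2 = p.1 then (s.1, s.2 + 1)
            else (s.1 + PySem.Int.floordiv (s.2 * (s.2 + 1)) 2, 1))
          (c, r);
        s.1 + PySem.Int.floordiv (s.2 * (s.2 + 1)) 2) = 2 * c + go2 x r ys := by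
  intro ys
  induction ys with
  | nil =>
    intro x c r
    simp [go2]
    have := two_mul_floordiv_even r
    omega
  | cons y r' ih =>
    intro x c r
    simp only [List.zip_cons_cons, List.foldl_cons]
    by_cases hxy : y = x
    · simp only [hxy, if_true]
      rw [ih x c (r + 1)]
      simp [go2]

    · simp only [hxy, if_false]
      rw [ih y (c + PySem.Int.floordiv (r * (r + 1)) 2) 1]
      simp [go2, hxy]
      have := two_mul_floordiv_even r
      omega

-- ===== VERDICT (by name: the statement is the Claim_ definition above) =====
theorem count_spec : Claim_equal_count := by
  intro row _
  unfold Spec_count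
  match row with
  | [] => decide
  | x :: xs =>
    have hA : count (x :: xs) = aRec ((x :: xs).length : Int) (-1) 0 0 (x :: xs) := by
      unfold count
      exact count_eq_aRec (x :: xs) (x :: xs) 0 0 (-1) rfl
    have hArun : 2 * count (x :: xs)
        = 2 * (xs.length : Int) + (xs.length : Int) * ((xs.length : Int) + 1) + 2
          - go2 x 1 xs := by
      rw [hA]
      have hn : (((x :: xs).length : Int)) = 0 + 1 + (xs.length : Int) := by push_cast [List.length_cons]; omega
      rw [hn]
      have := aRec_go2 xs x 0 (-1) 0
      rw [this]; norm_num
    have hB : 2 * count_alt (x :: xs)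
        = 2 * PySem.Int.floordiv ((((x :: xs).length : Int)) * (((x :: xs).length : Int) + 1)) 2
          - go2 x 1 xs := by
      unfold count_alt
      simp only
      have := bFold_go2 xs x 0 1
      have htail : (x :: xs).tail = xs := rfl
      simp only [htail] at *
      omega
    have htot : 2 * PySem.Int.floordiv ((((x :: xs).length : Int)) * (((x :: xs).length : Int) + 1)) 2
        = (((x :: xs).length : Int)) * (((x :: xs).length : Int) + 1) := by
      have h := Int.even_mul_succ_self (((x :: xs).length : Int))
      obtain ⟨k, hk⟩ := h
      have : PySem.Int.floordiv ((((x :: xs).length : Int)) * (((x :: xs).length : Int) + 1)) 2 = k := by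
        rw [PySem.Int.floordiv_eq_iff_of_pos (by omega)]; omega
      omega
    have hlen : (((x :: xs).length : Int)) = (xs.length : Int) + 1 := by push_cast [List.length_cons]; omega
    have : 2 * count (x :: xs) = 2 * count_alt (x :: xs) := by
      rw [hArun, hB, htot, hlen]; ring
    omega
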